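-- pv_equiv track=rewrite | github.com/anocaj/coding-fluency | micro_patterns/two_pointer_sliding_window.py | fixed_sliding_window
-- ===== SOURCE A (Python) =====
-- def fixed_sliding_window(arr, window_size):
--     """
--     Demonstrate sliding window with constant size for sum calculations.
--
--     Args:
--         arr: Array of numbers
--         window_size: Size of the sliding window
--
--     Returns:
--         list: Sums of each window position
--
--     Example:
--         >>> fixed_sliding_window([1, 2, 3, 4, 5], 3)
--         [6, 9, 12]
--     """
--     if len(arr) < window_size:
--         return []
--
--     window_sums = []
--
--     # Calculate sum of first window
--     window_sum = sum(arr[:window_size])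
--     window_sums.append(window_sum)
--
--     # Slide the window: remove leftmost element, add new rightmost element
--     for i in range(window_size, len(arr)):
--         window_sum = window_sum - arr[i - window_size] + arr[i]
--         window_sums.append(window_sum)
--
--     return window_sums
-- ===== SOURCE B (Python) =====
-- def fixed_sliding_window(arr, window_size):
--     """Prefix-sum re-implementation: each window sum is a table subtraction."""
--     if len(arr) < window_size:
--         return []
--     pre = [0]
--     for x in arr:
--         pre.append(pre[-1] + x)
--     return [pre[i + window_size] - pre[i] for i in range(len(arr) - window_size + 1)]
-- ===== Notes on version B (the rewrite author's own statement) =====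
-- stated objective: alternative
-- what changed: B precomputes a prefix-sum table and obtains every window sum as pre[i+window_size]-pre[i], instead of A's incremental running sum that subtracts the outgoing and adds the incoming element.
import Mathlib
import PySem

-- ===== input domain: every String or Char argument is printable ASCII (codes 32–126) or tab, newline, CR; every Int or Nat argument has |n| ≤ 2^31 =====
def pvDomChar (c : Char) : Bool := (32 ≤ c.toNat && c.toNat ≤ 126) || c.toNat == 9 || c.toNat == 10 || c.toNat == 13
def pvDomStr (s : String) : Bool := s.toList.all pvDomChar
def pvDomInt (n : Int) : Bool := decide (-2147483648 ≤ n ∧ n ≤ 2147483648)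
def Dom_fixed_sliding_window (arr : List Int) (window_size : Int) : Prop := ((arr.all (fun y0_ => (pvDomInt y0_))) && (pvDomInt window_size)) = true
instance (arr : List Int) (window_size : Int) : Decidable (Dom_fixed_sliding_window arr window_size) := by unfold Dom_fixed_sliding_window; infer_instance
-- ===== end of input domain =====

-- B replaces A's incremental running window sum by a prefix-sum table, reading each
-- window sum off as a subtraction of two table entries (alternative decomposition, same cost).

-- ===== PORT A =====
-- literal port of A: guard, sum of the first slice, then a foldl over range(window_size, len(arr))
-- carrying (window_sum, window_sums), appending each updated running sum.
def fixed_sliding_window (arr : List Int) (window_size : Int) : List Int :=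
  if (arr.length : Int) < window_size then []
  else
    let window_sum := (PySem.List.slice arr none (some window_size)).foldl (fun acc x => acc + x) 0
    ((PySem.List.pyRange window_size (arr.length : Int) 1).foldl
      (fun (st : Int × List Int) i =>
        let s := st.1 - PySem.List.pyGetD arr (i - window_size) 0 + PySem.List.pyGetD arr i 0
        (s, st.2 ++ [s]))
      (window_sum, [window_sum])).2

-- ===== PORT B =====
-- literal port of Source B: guard, build the prefix-sum list `pre` by appending pre[-1] + x,
-- then map the table subtraction over range(len(arr) - window_size + 1).
def fixed_sliding_window_alt (arr : List Int) (window_size : Int) : List Int :=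
  if (arr.length : Int) < window_size then []
  else
    let pre := arr.foldl (fun acc x => acc ++ [PySem.List.pyGetD acc (-1) 0 + x]) ([0] : List Int)
    (PySem.List.pyRange 0 ((arr.length : Int) - window_size + 1) 1).map
      (fun i => PySem.List.pyGetD pre (i + window_size) 0 - PySem.List.pyGetD pre i 0)

-- ===== PRECONDITION & SPEC =====
-- Pre_ excludes negative window_size, on which Python A raises IndexError
-- (arr[i - window_size] runs past the end on the last loop iteration); B raises there too.
def Pre_fixed_sliding_window (arr : List Int) (window_size : Int) : Prop := 0 ≤ window_size
instance (arr : List Int) (window_size : Int) : Decidable (Pre_fixed_sliding_window arr window_size) := by unfold Pre_fixed_sliding_window; infer_instance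

def pvWitness_fixed_sliding_window : List Int × Int := ([1, 2, 3, 4, 5], 3)

def Spec_fixed_sliding_window (arr : List Int) (window_size : Int) (out : List Int) : Prop := out = fixed_sliding_window_alt arr window_size
instance (arr : List Int) (window_size : Int) (out : List Int) : Decidable (Spec_fixed_sliding_window arr window_size out) := by unfold Spec_fixed_sliding_window; infer_instance

-- ===== CLAIM (what is proved, stated in full; the proofs are below) =====
def Claim_equal_fixed_sliding_window : Prop := ∀ (arr : List Int) (window_size : Int), Dom_fixed_sliding_window arr window_size → Pre_fixed_sliding_window arr window_size → Spec_fixed_sliding_window arr window_size (fixed_sliding_window arr window_size)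

-- ===== LEMMAS AND PROOFS =====

-- S arr k = sum of the first k elements (the ideal prefix-sum table).
def pvS (arr : List Int) (k : Nat) : Int := (arr.take k).sum

lemma pvS_succ (arr : List Int) (k : Nat) (hk : k < arr.length) :
    pvS arr (k + 1) = pvS arr k + arr.getD k 0 := by
  have h1 : arr.take (k + 1) = arr.take k ++ [arr[k]] := by
    rw [List.take_add_one, List.getElem?_eq_getElem hk]
    simp
  unfold pvS
  rw [h1, List.sum_append, List.sum_singleton]
  simp [List.getD_eq_getElem?_getD, List.getElem?_eq_getElem hk]

-- B's foldl builds exactly the prefix-sum table.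
lemma pvPre_build (l acc : List Int) (t : Int) (h : PySem.List.pyGetD acc (-1) 0 = t) :
    l.foldl (fun acc x => acc ++ [PySem.List.pyGetD acc (-1) 0 + x]) acc
      = acc ++ (List.range l.length).map (fun k => t + (l.take (k + 1)).sum) := by
  induction l generalizing acc t with
  | nil => simp
  | cons x xs ih =>
    rw [List.foldl_cons, h, ih (acc ++ [t + x]) (t + x)
      (by simp [PySem.List.pyGetD, PySem.List.pyGet?, PySem.List.pyIdx?])]
    rw [List.length_cons, List.range_succ_eq_map, List.map_cons, List.map_map,
      List.append_assoc, List.singleton_append]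
    congr 1
    congr 1
    · simp
    · refine List.map_congr_left (fun k _ => ?_)
      simp only [Function.comp, Nat.succ_eq_add_one, List.take_succ_cons, List.sum_cons]
      ring

lemma pvPre_eq (arr : List Int) :
    arr.foldl (fun acc x => acc ++ [PySem.List.pyGetD acc (-1) 0 + x]) ([0] : List Int)
      = (List.range (arr.length + 1)).map (pvS arr) := by
  rw [pvPre_build arr [0] 0 (by decide)]
  rw [List.range_succ_eq_map]
  simp [pvS, Function.comp]

-- A's loop invariant: after processing i = w .. w+m-1, the running sum is the window sum at
-- start m and the accumulated list holds the window sums at starts 0..m.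
lemma pvA_loop (arr : List Int) (w m : Nat) (hmn : w + m ≤ arr.length) :
    ((PySem.List.pyRange (w : Int) ((w + m : Nat) : Int) 1).foldl
      (fun (st : Int × List Int) i =>
        let s := st.1 - PySem.List.pyGetD arr (i - (w : Int)) 0 + PySem.List.pyGetD arr i 0
        (s, st.2 ++ [s]))
      (pvS arr w - pvS arr 0, [pvS arr w - pvS arr 0]))
    = (pvS arr (m + w) - pvS arr m,
       (List.range (m + 1)).map (fun k => pvS arr (k + w) - pvS arr k)) := by
  induction m with
  | zero =>
    rw [Nat.add_zero, PySem.List.pyRange_one_eq_nil le_rfl]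
    simp
  | succ m ih =>
    have h1 : ((w + (m + 1) : Nat) : Int) = ((w + m : Nat) : Int) + 1 := by push_cast; ring
    have h2 : (w : Int) ≤ ((w + m : Nat) : Int) := by push_cast; omega
    rw [h1, PySem.List.pyRange_one_succ_right h2, List.foldl_append, ih (by omega)]
    simp only [List.foldl_cons, List.foldl_nil]
    have hw : ((w + m : Nat) : Int) - (w : Int) = ((m : Nat) : Int) := by push_cast; ring
    rw [hw, PySem.List.pyGetD_natCast, PySem.List.pyGetD_natCast]
    have hs1 : pvS arr (m + 1) = pvS arr m + arr.getD m 0 := pvS_succ arr m (by omega)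
    have hs2 : pvS arr (m + w + 1) = pvS arr (m + w) + arr.getD (w + m) 0 := by
      have := pvS_succ arr (m + w) (by omega)
      simpa [Nat.add_comm m w] using this
    have hv : pvS arr (m + w) - pvS arr m - arr.getD m 0 + arr.getD (w + m) 0
        = pvS arr (m + 1 + w) - pvS arr (m + 1) := by
      rw [show m + 1 + w = m + w + 1 from by omega, hs1, hs2]; ring
    rw [Prod.mk.injEq]
    refine ⟨hv, ?_⟩
    rw [hv]
    conv_rhs => rw [List.range_succ, List.map_append, List.map_singleton]

-- ===== VERDICT (by name: the statement is the Claim_ definition above) =====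
theorem fixed_sliding_window_spec : Claim_equal_fixed_sliding_window := by
  intro arr window_size _ hpre
  unfold Spec_fixed_sliding_window fixed_sliding_window fixed_sliding_window_alt
  by_cases hg : (arr.length : Int) < window_size
  · simp [hg]
  · simp only [hg, if_false]
    obtain ⟨w, rfl⟩ : ∃ w : Nat, window_size = (w : Int) :=
      ⟨window_size.toNat, (Int.toNat_of_nonneg hpre).symm⟩
    have hwn : w ≤ arr.length := by exact_mod_cast not_lt.mp hg
    -- first window sum
    have hfirst : (PySem.List.slice arr none (some (w : Int))).foldl (fun acc x => acc + x) 0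
        = pvS arr w - pvS arr 0 := by
      rw [PySem.List.slice_to arr (by positivity)]
      simpa [pvS] using PySem.List.foldl_add (arr.take ((w : Int)).toNat) id 0
    -- B side: prefix table + table-subtraction map over a Nat range
    have hcnt : (arr.length : Int) - (w : Int) + 1 = ((arr.length - w + 1 : Nat) : Int) := by
      push_cast; omega
    rw [hfirst, pvPre_eq arr, hcnt, PySem.List.pyRange_zero_natCast, List.map_map]
    -- A side via the loop invariant
    have hn : (arr.length : Int) = ((w + (arr.length - w) : Nat) : Int) := by push_cast; omega
    rw [hn, pvA_loop arr w (arr.length - w) (by omega)]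
    dsimp only
    apply List.map_congr_left
    intro k hk
    have hk' : k < arr.length - w + 1 := List.mem_range.mp hk
    have hc : ((k : Nat) : Int) + (w : Int) = ((k + w : Nat) : Int) := by push_cast; ring
    simp only [Function.comp, hc, PySem.List.pyGetD_natCast]
    rw [PySem.List.getD_map_range (pvS arr) _ _ _ (by omega),
        PySem.List.getD_map_range (pvS arr) _ _ _ (by omega)]
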